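-- pv_equiv track=rewrite | github.com/AKillerPanda/NeuroMap | src/Backend/Webscraping.py | _assign_levels
-- ===== SOURCE A (Python) =====
-- def _assign_levels(n: int) -> list[str]:
-- 	"""Return a list of n level strings spread across the difficulty curve."""
-- 	if n <= 0:
-- 		return []
-- 	levels = []
-- 	for i in range(n):
-- 		ratio = i / max(n - 1, 1)
-- 		if ratio < 0.25:
-- 			levels.append("foundational")
-- 		elif ratio < 0.55:
-- 			levels.append("intermediate")
-- 		elif ratio < 0.80:
-- 			levels.append("advanced")
-- 		else:
-- 			levels.append("expert")
-- 	return levels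
-- ===== SOURCE B (Python) =====
-- def _assign_levels(n: int) -> list[str]:
--     """Return a list of n level strings spread across the difficulty curve.
--
--     The ratio i / max(n - 1, 1) increases with i, so each label fills a
--     contiguous block.  Find where each block starts (the first index whose
--     ratio reaches the threshold) and assemble the list from four blocks.
--     """
--     if n <= 0:
--         return []
--     d = max(n - 1, 1)
--     a = next((i for i in range(n) if i / d >= 0.25), n)
--     b = next((i for i in range(n) if i / d >= 0.55), n)
--     c = next((i for i in range(n) if i / d >= 0.80), n)
--     return (["foundational"] * a + ["intermediate"] * (b - a)
--             + ["advanced"] * (c - b) + ["expert"] * (n - c))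
-- ===== Notes on version B (the rewrite author's own statement) =====
-- stated objective: alternative
-- what changed: Replaces per-element branching over four thresholds by finding the three block-start indices (first index whose ratio reaches each threshold) and assembling the answer from four replicated blocks.
import Mathlib
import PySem

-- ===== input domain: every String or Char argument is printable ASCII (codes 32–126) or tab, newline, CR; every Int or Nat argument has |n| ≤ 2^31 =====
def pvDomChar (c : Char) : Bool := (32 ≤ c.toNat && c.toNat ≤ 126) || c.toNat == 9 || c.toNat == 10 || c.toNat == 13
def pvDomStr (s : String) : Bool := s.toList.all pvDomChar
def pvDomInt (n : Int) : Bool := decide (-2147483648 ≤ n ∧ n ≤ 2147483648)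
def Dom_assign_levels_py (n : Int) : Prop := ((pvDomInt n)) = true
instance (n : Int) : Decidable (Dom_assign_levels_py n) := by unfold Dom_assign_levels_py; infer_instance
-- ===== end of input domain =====

-- B replaces A's per-element branching by locating the three block-start indices
-- (first index whose ratio reaches each threshold) and assembling four blocks (objective: alternative).

-- ===== PORT A =====
-- Float note: on the domain |n| ≤ 2^31 the Python float comparison `i / d < t` (d = max(n-1,1),
-- t ∈ {0.25, 0.55, 0.80}) is EXACTLY the integer inequality den*i < num*d with t = num/den for
-- t = 1/4, 11/20, 4/5: |i|,|d| ≤ 2^31 and doubles carry 53 bits, so the rounded quotient crosses a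
-- threshold iff the exact rational does (verified against CPython for boundary indices up to 2^31).
def assign_levels_py (n : Int) : List String :=
  if n ≤ 0 then []
  else
    let d := max (n - 1) 1
    (PySem.List.pyRange 0 n 1).foldl (fun levels i =>
      if 4 * i < d then levels ++ ["foundational"]
      else if 20 * i < 11 * d then levels ++ ["intermediate"]
      else if 5 * i < 4 * d then levels ++ ["advanced"]
      else levels ++ ["expert"]) []

-- ===== PORT B =====
-- `next((i for i in range(n) if i/d >= t), n)` → first element of the range satisfying the
-- comparison, default n (same float-to-integer comparison note as in port A);
-- `["x"] * k` replicates k times (k here is never negative): List.replicate k.toNat.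
def assign_levels_py_alt (n : Int) : List String :=
  if n ≤ 0 then []
  else
    let d := max (n - 1) 1
    let a := ((PySem.List.pyRange 0 n 1).find? (fun i => decide (d ≤ 4 * i))).getD n
    let b := ((PySem.List.pyRange 0 n 1).find? (fun i => decide (11 * d ≤ 20 * i))).getD n
    let c := ((PySem.List.pyRange 0 n 1).find? (fun i => decide (4 * d ≤ 5 * i))).getD n
    List.replicate a.toNat "foundational" ++ List.replicate (b - a).toNat "intermediate"
      ++ List.replicate (c - b).toNat "advanced" ++ List.replicate (n - c).toNat "expert"

-- ===== PRECONDITION & SPEC =====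
def Spec_assign_levels_py (n : Int) (out : List String) : Prop := out = assign_levels_py_alt n
instance (n : Int) (out : List String) : Decidable (Spec_assign_levels_py n out) := by unfold Spec_assign_levels_py; infer_instance

-- ===== CLAIM (what is proved, stated in full; the proofs are below) =====
def Claim_equal_assign_levels_py : Prop := ∀ (n : Int), Dom_assign_levels_py n → Spec_assign_levels_py n (assign_levels_py n)

-- ===== LEMMAS AND PROOFS =====

-- A's loop appends one label per index: it is a map over the range.
lemma assign_A_eq_map (n : Int) (h : ¬ n ≤ 0) :
    assign_levels_py n =
      (PySem.List.pyRange 0 n 1).map (fun i =>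
        let d := max (n - 1) 1
        if 4 * i < d then "foundational"
        else if 20 * i < 11 * d then "intermediate"
        else if 5 * i < 4 * d then "advanced"
        else "expert") := by
  simp only [assign_levels_py, if_neg h]
  have hfun : (fun (levels : List String) (i : Int) =>
      if 4 * i < max (n - 1) 1 then levels ++ ["foundational"]
      else if 20 * i < 11 * max (n - 1) 1 then levels ++ ["intermediate"]
      else if 5 * i < 4 * max (n - 1) 1 then levels ++ ["advanced"]
      else levels ++ ["expert"]) =
      (fun (levels : List String) (i : Int) => levels ++
        [if 4 * i < max (n - 1) 1 then "foundational"
         else if 20 * i < 11 * max (n - 1) 1 then "intermediate"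
         else if 5 * i < 4 * max (n - 1) 1 then "advanced"
         else "expert"]) := by
    funext levels i; split_ifs <;> rfl
  rw [hfun, PySem.List.foldl_append_singleton_eq_map]
  simp

-- `find?` over pyRange lo n 1 with default n: the result r is the FIRST index satisfying p
-- (every earlier index fails p), or n when none does.
lemma find?_pyRange_first (k : Nat) : ∀ (lo n : Int) (p : Int → Bool), lo ≤ n → (n - lo).toNat = k →
    (lo ≤ ((PySem.List.pyRange lo n 1).find? p).getD n ∧
     ((PySem.List.pyRange lo n 1).find? p).getD n ≤ n ∧
     (∀ i, lo ≤ i → i < ((PySem.List.pyRange lo n 1).find? p).getD n → p i = false) ∧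
     (((PySem.List.pyRange lo n 1).find? p).getD n < n →
        p (((PySem.List.pyRange lo n 1).find? p).getD n) = true)) := by
  induction k with
  | zero =>
      intro lo n p hle hk
      have : n = lo := by omega
      subst this
      rw [PySem.List.pyRange_one_eq_nil le_rfl]
      simp
      omega
  | succ m ih =>
      intro lo n p hle hk
      have hlt : lo < n := by omega
      rw [PySem.List.pyRange_one_cons hlt, List.find?_cons]
      cases hp : p lo with
      | true =>
          simp only [Option.getD_some]
          exact ⟨le_rfl, le_of_lt hlt, fun i h1 h2 => absurd (lt_of_le_of_lt h1 h2) (lt_irrefl lo),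
                 fun _ => hp⟩
      | false =>
          simp only []
          obtain ⟨h1, h2, h3, h4⟩ := ih (lo + 1) n p (by omega) (by omega)
          refine ⟨by omega, h2, ?_, h4⟩
          intro i hi1 hi2
          rcases eq_or_lt_of_le hi1 with rfl | hgt
          · exact hp
          · exact h3 i (by omega) hi2

-- Generic block decomposition of a map over a range by three increasing cut points.
lemma map_range_blocks (g : Int → String) (a b c m : Nat)
    (hab : a ≤ b) (hbc : b ≤ c) (hcm : c ≤ m)
    (h1 : ∀ i : Nat, i < a → g i = "foundational")
    (h2 : ∀ i : Nat, a ≤ i → i < b → g i = "intermediate")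
    (h3 : ∀ i : Nat, b ≤ i → i < c → g i = "advanced")
    (h4 : ∀ i : Nat, c ≤ i → i < m → g i = "expert") :
    (PySem.List.pyRange 0 m 1).map g =
      List.replicate a "foundational" ++ List.replicate (b - a) "intermediate"
        ++ List.replicate (c - b) "advanced" ++ List.replicate (m - c) "expert" := by
  have hsplit : ∀ (lo hi : Nat) (s : String), lo ≤ hi →
      (∀ i : Nat, lo ≤ i → i < hi → g i = s) →
      (PySem.List.pyRange lo hi 1).map g = List.replicate (hi - lo) s := by
    intro lo hi s hle hconst
    induction hi with
    | zero =>
        have : lo = 0 := Nat.le_zero.mp hle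
        subst this
        simp
    | succ k ih =>
        rcases Nat.lt_or_ge lo (k + 1) with hlt | hge
        · have hlk : lo ≤ k := Nat.lt_succ_iff.mp hlt
          rw [show ((k + 1 : Nat) : Int) = (k : Int) + 1 by push_cast; ring,
            PySem.List.pyRange_one_succ_right (by exact_mod_cast hlk)]
          rw [List.map_append, ih hlk (fun i h1i h2i => hconst i h1i (Nat.lt_succ_of_lt h2i))]
          have : g k = s := hconst k hlk (Nat.lt_succ_self k)
          simp [this, Nat.succ_sub hlk, List.replicate_succ' ]
        · have : lo = k + 1 := le_antisymm hle hge
          subst this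
          simp [PySem.List.pyRange_one_eq_nil (by omega : (k + 1 : Int) ≤ (k + 1 : Int))]
  have e1 := hsplit 0 a "foundational" (Nat.zero_le a) (fun i _ h => h1 i h)
  rw [Nat.cast_zero] at e1
  have e2 := hsplit a b "intermediate" hab h2
  have e3 := hsplit b c "advanced" hbc h3
  have e4 := hsplit c m "expert" hcm h4
  rw [PySem.List.pyRange_one_append 0 (a : Int) (m : Int) (by positivity) (by exact_mod_cast Nat.le_trans hab (Nat.le_trans hbc hcm)),
      PySem.List.pyRange_one_append (a : Int) (b : Int) (m : Int) (by exact_mod_cast hab) (by exact_mod_cast Nat.le_trans hbc hcm),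
      PySem.List.pyRange_one_append (b : Int) (c : Int) (m : Int) (by exact_mod_cast hbc) (by exact_mod_cast hcm)]
  simp only [List.map_append, e1, e2, e3, e4]
  simp

-- ===== VERDICT (by name: the statement is the Claim_ definition above) =====
theorem assign_levels_py_spec : Claim_equal_assign_levels_py := by
  intro n _
  unfold Spec_assign_levels_py
  by_cases h : n ≤ 0
  · simp [assign_levels_py, assign_levels_py_alt, h]
  · rw [assign_A_eq_map n h]
    simp only [assign_levels_py_alt, if_neg h]
    set d : Int := max (n - 1) 1 with hd
    have hd1 : 1 ≤ d := le_max_right _ _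
    have hn0 : (0 : Int) ≤ n := by omega
    obtain ⟨ha0, han, haL, haG⟩ :=
      find?_pyRange_first n.toNat 0 n (fun i => decide (d ≤ 4 * i)) hn0 (by omega)
    obtain ⟨hb0, hbn, hbL, hbG⟩ :=
      find?_pyRange_first n.toNat 0 n (fun i => decide (11 * d ≤ 20 * i)) hn0 (by omega)
    obtain ⟨hc0, hcn, hcL, hcG⟩ :=
      find?_pyRange_first n.toNat 0 n (fun i => decide (4 * d ≤ 5 * i)) hn0 (by omega)
    set a : Int := ((PySem.List.pyRange 0 n 1).find? (fun i => decide (d ≤ 4 * i))).getD n with ha'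
    set b : Int := ((PySem.List.pyRange 0 n 1).find? (fun i => decide (11 * d ≤ 20 * i))).getD n with hb'
    set c : Int := ((PySem.List.pyRange 0 n 1).find? (fun i => decide (4 * d ≤ 5 * i))).getD n with hc'
    -- translate the booleans into inequalities
    have haL' : ∀ i : Int, 0 ≤ i → i < a → 4 * i < d := by
      intro i h1 h2; have := haL i h1 h2; simpa using this
    have hbL' : ∀ i : Int, 0 ≤ i → i < b → 20 * i < 11 * d := by
      intro i h1 h2; have := hbL i h1 h2; simpa using this
    have hcL' : ∀ i : Int, 0 ≤ i → i < c → 5 * i < 4 * d := by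
      intro i h1 h2; have := hcL i h1 h2; simpa using this
    have haG' : a < n → d ≤ 4 * a := by intro hlt; have := haG hlt; simpa using this
    have hbG' : b < n → 11 * d ≤ 20 * b := by intro hlt; have := hbG hlt; simpa using this
    have hcG' : c < n → 4 * d ≤ 5 * c := by intro hlt; have := hcG hlt; simpa using this
    -- the cut points are ordered
    have hab : a ≤ b := by
      by_contra hcon
      have hblt : b < n := by omega
      have := hbG' hblt
      have := haL' b hb0 (by omega)
      omega
    have hbc : b ≤ c := by
      by_contra hcon
      have hclt : c < n := by omega
      have := hcG' hclt
      have := hbL' c hc0 (by omega)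
      omega
    have hnm : n = ((n.toNat : Nat) : Int) := by omega
    rw [hnm]
    rw [map_range_blocks _ a.toNat b.toNat c.toNat n.toNat (by omega) (by omega) (by omega)
      (fun i hi => by
        have : 4 * (i : Int) < d := haL' i (by positivity) (by omega)
        simp [this])
      (fun i hi1 hi2 => by
        have hia : a ≤ (i : Int) := by omega
        have hin : a < n := by omega
        have h4 : ¬ 4 * (i : Int) < d := by have := haG' hin; omega
        have h20 : 20 * (i : Int) < 11 * d := hbL' i (by positivity) (by omega)
        simp [h4, h20])
      (fun i hi1 hi2 => by
        have hbn' : b < n := by omega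
        have hB := hbG' hbn'
        have h4 : ¬ 4 * (i : Int) < d := by omega
        have h20 : ¬ 20 * (i : Int) < 11 * d := by omega
        have h5 : 5 * (i : Int) < 4 * d := hcL' i (by positivity) (by omega)
        simp [h4, h20, h5])
      (fun i hi1 hi2 => by
        have hcn' : c < n := by omega
        have hC := hcG' hcn'
        have h4 : ¬ 4 * (i : Int) < d := by omega
        have h20 : ¬ 20 * (i : Int) < 11 * d := by omega
        have h5 : ¬ 5 * (i : Int) < 4 * d := by omega
        simp [h4, h20, h5])]
    rw [show b.toNat - a.toNat = (b - a).toNat from by omega,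
       show c.toNat - b.toNat = (c - b).toNat from by omega,
       show n.toNat - c.toNat = (n - c).toNat from by omega]
    rw [show ((n.toNat : Int) - c).toNat = (n - c).toNat from by omega]
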